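-- pv_equiv track=rewrite | github.com/CAMI-challenge/CAMISIM | calculate_multiplication_factor.py | validate_sequence_quality
-- ===== SOURCE A (Python) =====
-- qformats = {
-- 		"sanger": [0, 40, 33],
-- 		"solexa": [-5, 40, 64],
-- 		"illumina": [0, 41, 33]  # 1.8+
-- 	}
--
-- def validate_sequence_quality(quality, qformat="Illumina", key=None, silent=False):
-- 		"""
-- 			Validate that the sequence description has only valid characters
--
-- 			@attention:
--
-- 			@param quality: quality of each letter
-- 			@type quality: list[int]
-- 			@param qformat: 'Illumina', 'Sanger', 'Solexa'
-- 			@type qformat: str | unicode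
-- 			@param key: If True, no error message will be made
-- 			@type key: str | unicode | None
-- 			@param silent: If True, no error message will be made
-- 			@type silent: bool
--
-- 			@return: True if valid, else False
-- 			@rtype: bool
-- 		"""
-- 		assert isinstance(quality, list)
-- 		assert isinstance(silent, bool)
-- 		assert isinstance(qformat, str)
-- 		qformat = qformat.lower()
-- 		assert qformat in qformats, "{} not in {}".format(qformat, qformats.keys())
--
-- 		prefix = ""
-- 		if key:
-- 			prefix = "'{}' ".format(key)
--
-- 		# offset = self._qformats[qformat][2]
-- 		minimum = qformats[qformat][0]  # +offset
-- 		maximum = qformats[qformat][1]  # +offset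
--
-- 		invalid_indexes = [
-- 			"{}: '{}'".format(index, value) for index, value in enumerate(quality) if not minimum <= value <= maximum]
-- 		if len(invalid_indexes) > 0:
-- 			#if not silent:
-- 				#self._logger.error("{}Invalid quality at: {}.".format(prefix, ", ".join(invalid_indexes)))
-- 			return False
-- 		return True
-- ===== SOURCE B (Python) =====
-- qformats = {
--         "sanger": [0, 40, 33],
--         "solexa": [-5, 40, 64],
--         "illumina": [0, 41, 33]  # 1.8+
--     }
--
-- def validate_sequence_quality(quality, qformat="Illumina", key=None, silent=False):
--     """True iff every quality value lies in the format's range; decided via min/max."""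
--     assert isinstance(quality, list)
--     assert isinstance(silent, bool)
--     assert isinstance(qformat, str)
--     qformat = qformat.lower()
--     assert qformat in qformats, "{} not in {}".format(qformat, qformats.keys())
--     minimum = qformats[qformat][0]
--     maximum = qformats[qformat][1]
--     if not quality:
--         return True
--     return minimum <= min(quality) and max(quality) <= maximum
-- ===== Notes on version B (the rewrite author's own statement) =====
-- stated objective: simpler
-- what changed: Replaces the per-element invalid-index comprehension (which formats a diagnostic string for every offending element and tests the list's length) with an aggregate min/max reduction: the list is valid iff minimum <= min(quality) and max(quality) <= maximum, with the empty list handled directly.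
import Mathlib
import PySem

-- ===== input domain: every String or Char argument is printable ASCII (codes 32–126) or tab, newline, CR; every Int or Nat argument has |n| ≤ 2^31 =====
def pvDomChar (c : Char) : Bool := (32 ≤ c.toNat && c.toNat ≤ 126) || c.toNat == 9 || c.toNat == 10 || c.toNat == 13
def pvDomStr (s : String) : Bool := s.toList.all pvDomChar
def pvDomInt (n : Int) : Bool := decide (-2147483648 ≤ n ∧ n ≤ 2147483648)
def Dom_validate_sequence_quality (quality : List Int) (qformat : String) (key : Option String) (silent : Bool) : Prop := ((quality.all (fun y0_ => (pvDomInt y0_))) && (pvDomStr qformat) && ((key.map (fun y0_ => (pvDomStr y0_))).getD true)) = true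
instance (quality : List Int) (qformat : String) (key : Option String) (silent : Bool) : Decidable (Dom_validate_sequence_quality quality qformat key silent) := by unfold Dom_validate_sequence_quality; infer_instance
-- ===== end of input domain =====

-- B replaces A's per-element invalid-index comprehension with a min/max aggregate check (same return value).

-- module-level constant 'qformats' (shared by both Python files)
def pyQformats : PySem.Dict String (List Int) :=
  PySem.Dict.ofList [("sanger", [0, 40, 33]), ("solexa", [-5, 40, 64]), ("illumina", [0, 41, 33])]

-- ===== PORT A =====
def validate_sequence_quality (quality : List Int) (qformat : String) (key : Option String) (silent : Bool) : Bool :=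
  let qf := PySem.Str.lower qformat
  -- prefix is computed but unused by the return value (the logging line using it is commented out in A)
  let _prefix : String := match key with
    | some k => if k ≠ "" then "'" ++ k ++ "' " else ""
    | none => ""
  let entry := pyQformats.getD qf []
  let minimum := PySem.List.pyGetD entry 0 0
  let maximum := PySem.List.pyGetD entry 1 0
  let invalid_indexes :=
    ((PySem.List.enumerate quality 0).filter
        (fun iv => !(decide (minimum ≤ iv.2) && decide (iv.2 ≤ maximum)))).map
      (fun iv => PySem.Int.toStr iv.1 ++ ": '" ++ PySem.Int.toStr iv.2 ++ "'")
  if invalid_indexes.length > 0 then false else true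

-- ===== PORT B =====
def validate_sequence_quality_alt (quality : List Int) (qformat : String) (key : Option String) (silent : Bool) : Bool :=
  let qf := PySem.Str.lower qformat
  let entry := pyQformats.getD qf []
  let minimum := PySem.List.pyGetD entry 0 0
  let maximum := PySem.List.pyGetD entry 1 0
  match quality with
  | [] => true
  | x :: t =>
    match PySem.List.min? (x :: t) (fun v => v), PySem.List.max? (x :: t) (fun v => v) with
    | some lo, some hi => decide (minimum ≤ lo) && decide (hi ≤ maximum)
    | _, _ => true

-- ===== PRECONDITION & SPEC =====
-- Pre_ excludes exactly the qformat strings whose lowercasing is not a key of qformats: there A raises AssertionError.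
def Pre_validate_sequence_quality (quality : List Int) (qformat : String) (key : Option String) (silent : Bool) : Prop :=
  PySem.Str.lower qformat = "sanger" ∨ PySem.Str.lower qformat = "solexa" ∨ PySem.Str.lower qformat = "illumina"
instance (quality : List Int) (qformat : String) (key : Option String) (silent : Bool) : Decidable (Pre_validate_sequence_quality quality qformat key silent) := by unfold Pre_validate_sequence_quality; infer_instance
def pvWitness_validate_sequence_quality : List Int × String × Option String × Bool := ([1, 40, 0], "Sanger", some "k1", false)

def Spec_validate_sequence_quality (quality : List Int) (qformat : String) (key : Option String) (silent : Bool) (out : Bool) : Prop := out = validate_sequence_quality_alt quality qformat key silent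
instance (quality : List Int) (qformat : String) (key : Option String) (silent : Bool) (out : Bool) : Decidable (Spec_validate_sequence_quality quality qformat key silent out) := by unfold Spec_validate_sequence_quality; infer_instance

-- ===== CLAIM (what is proved, stated in full; the proofs are below) =====
def Claim_equal_validate_sequence_quality : Prop := ∀ (quality : List Int) (qformat : String) (key : Option String) (silent : Bool), Dom_validate_sequence_quality quality qformat key silent → Pre_validate_sequence_quality quality qformat key silent → Spec_validate_sequence_quality quality qformat key silent (validate_sequence_quality quality qformat key silent)

-- ===== LEMMAS AND PROOFS =====

-- A's invalid-index list is empty iff every element is in range (any start index).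
theorem filter_enumerate_empty (lo hi : Int) :
    ∀ (xs : List Int) (s : Int),
      (((PySem.List.enumerate xs s).filter
          (fun iv => !(decide (lo ≤ iv.2) && decide (iv.2 ≤ hi)))) = []) ↔
        ∀ v ∈ xs, lo ≤ v ∧ v ≤ hi := by
  intro xs s
  rw [List.filter_eq_nil_iff]
  constructor
  · intro h v hv
    obtain ⟨k, hk, rfl⟩ := List.mem_iff_getElem.mp hv
    have := h (s + k, xs[k]) ((PySem.List.mem_enumerate_iff _ _ _).mpr ⟨k, hk, rfl⟩)
    simpa using this
  · intro h p hp
    obtain ⟨k, hk, rfl⟩ := (PySem.List.mem_enumerate_iff _ _ _).mp hp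
    have := h xs[k] (List.getElem_mem hk)
    simpa using this

theorem foldl_min_lb (lo : Int) :
    ∀ (t : List Int) (x : Int), lo ≤ t.foldl min x ↔ lo ≤ x ∧ ∀ v ∈ t, lo ≤ v := by
  intro t
  induction t with
  | nil => simp
  | cons y t ih =>
    intro x
    simp only [List.foldl_cons, ih (min x y), le_min_iff, List.mem_cons]
    constructor
    · rintro ⟨⟨h1, h2⟩, h3⟩
      exact ⟨h1, fun v hv => by rcases hv with rfl | hv; exact h2; exact h3 v hv⟩
    · rintro ⟨h1, h2⟩
      exact ⟨⟨h1, h2 y (Or.inl rfl)⟩, fun v hv => h2 v (Or.inr hv)⟩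

theorem foldl_max_ub (hi : Int) :
    ∀ (t : List Int) (x : Int), t.foldl max x ≤ hi ↔ x ≤ hi ∧ ∀ v ∈ t, v ≤ hi := by
  intro t
  induction t with
  | nil => simp
  | cons y t ih =>
    intro x
    simp only [List.foldl_cons, ih (max x y), max_le_iff, List.mem_cons]
    constructor
    · rintro ⟨⟨h1, h2⟩, h3⟩
      exact ⟨h1, fun v hv => by rcases hv with rfl | hv; exact h2; exact h3 v hv⟩
    · rintro ⟨h1, h2⟩
      exact ⟨⟨h1, h2 y (Or.inl rfl)⟩, fun v hv => h2 v (Or.inr hv)⟩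

-- ===== VERDICT (by name: the statement is the Claim_ definition above) =====
theorem validate_sequence_quality_spec : Claim_equal_validate_sequence_quality := by
  intro quality qformat key silent _hdom _hpre
  unfold Spec_validate_sequence_quality validate_sequence_quality validate_sequence_quality_alt
  cases quality with
  | nil => simp [PySem.List.enumerate_nil]
  | cons x t =>
    dsimp only
    rw [PySem.List.min?_id_cons, PySem.List.max?_id_cons]
    set lo := PySem.List.pyGetD (pyQformats.getD (PySem.Str.lower qformat) []) 0 0 with hlo
    set hi := PySem.List.pyGetD (pyQformats.getD (PySem.Str.lower qformat) []) 1 0 with hhi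
    simp only [List.length_map, gt_iff_lt, List.length_pos_iff, ne_eq]
    by_cases h : ∀ v ∈ x :: t, lo ≤ v ∧ v ≤ hi
    · have hA := (filter_enumerate_empty lo hi (x :: t) 0).mpr h
      have hB : lo ≤ t.foldl min x ∧ t.foldl max x ≤ hi := by
        refine ⟨(foldl_min_lb lo t x).mpr ⟨(h x (by simp)).1, fun v hv => (h v (by simp [hv])).1⟩,
                (foldl_max_ub hi t x).mpr ⟨(h x (by simp)).2, fun v hv => (h v (by simp [hv])).2⟩⟩
      rw [hA]
      simp [hB.1, hB.2]
    · have hA := (filter_enumerate_empty lo hi (x :: t) 0).not.mpr h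
      have hB : ¬ (lo ≤ t.foldl min x ∧ t.foldl max x ≤ hi) := by
        intro hc
        exact h fun v hv => by
          rcases List.mem_cons.mp hv with rfl | hv
          · exact ⟨((foldl_min_lb lo t v).mp hc.1).1, ((foldl_max_ub hi t v).mp hc.2).1⟩
          · exact ⟨((foldl_min_lb lo t x).mp hc.1).2 v hv, ((foldl_max_ub hi t x).mp hc.2).2 v hv⟩
      rw [not_and_or] at hB
      rw [if_pos hA]
      rcases hB with hB | hB <;> simp [hB]
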